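-- pv_equiv track=rewrite | github.com/Radioleg99/SocialRobotics | main_new.py | _pop_ready_clauses
-- ===== SOURCE A (Python) =====
-- from typing import Any, Dict, List, Optional, Tuple
--
-- def _pop_ready_clauses(text: str) -> Tuple[List[str], str]:
--     clauses: List[str] = []
--     start = 0
--     for idx, char in enumerate(text):
--         if char in ".?!":
--             clause = text[start : idx + 1].strip()
--             if clause:
--                 clauses.append(clause)
--             start = idx + 1
--     remainder = text[start:]
--     return clauses, remainder
-- ===== SOURCE B (Python) =====
-- from typing import List, Tuple
--
-- def _pop_ready_clauses(text: str) -> Tuple[List[str], str]: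
--     clauses: List[str] = []
--     buf: List[str] = []
--     for ch in text:
--         buf.append(ch)
--         if ch in ".?!":
--             clause = "".join(buf).strip()
--             if clause:
--                 clauses.append(clause)
--             buf = []
--     return clauses, "".join(buf)
-- ===== Notes on version B (the rewrite author's own statement) =====
-- stated objective: alternative
-- what changed: Replaced A's index-tracking loop that re-slices the full text at each sentence terminator with a single-pass character fold that accumulates the current clause in a buffer and flushes it whenever a terminator character arrives; the remainder is the leftover buffer.
import Mathlib
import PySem

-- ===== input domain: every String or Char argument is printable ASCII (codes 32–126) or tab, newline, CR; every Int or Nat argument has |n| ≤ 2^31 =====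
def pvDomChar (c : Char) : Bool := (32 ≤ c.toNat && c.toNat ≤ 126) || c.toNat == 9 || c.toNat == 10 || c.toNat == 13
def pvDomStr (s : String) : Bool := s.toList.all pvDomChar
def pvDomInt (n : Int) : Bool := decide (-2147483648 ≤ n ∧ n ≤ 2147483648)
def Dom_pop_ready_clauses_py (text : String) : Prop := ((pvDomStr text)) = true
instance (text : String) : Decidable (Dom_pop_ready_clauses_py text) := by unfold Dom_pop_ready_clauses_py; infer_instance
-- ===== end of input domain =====

-- B replaces A's index-tracking + slicing loop with a single-pass character fold that
-- accumulates the current clause in a buffer; objective: alternative (same cost, no index arithmetic).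


-- ===== PORT A =====
-- A's loop body: 'if char in ".?!": clause = text[start:idx+1].strip(); if clause: append; start = idx+1'
def pvAStep (cs : List Char) (acc : List String × Int) (p : Int × Char) : List String × Int :=
  if p.2 = '.' ∨ p.2 = '?' ∨ p.2 = '!' then
    let clause := PySem.Chars.strip (PySem.List.slice cs (some acc.2) (some (p.1 + 1)))
    ((if clause ≠ [] then acc.1 ++ [String.ofList clause] else acc.1), p.1 + 1)
  else acc

def pop_ready_clauses_py (text : String) : List String × String :=
  let cs := text.toList
  let r := (PySem.List.enumerate cs 0).foldl (pvAStep cs) ([], 0)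
  (r.1, String.ofList (PySem.List.slice cs (some r.2) none))

-- ===== PORT B =====
-- B's loop body: push ch onto the buffer; on a terminator, strip/flush the buffer
def pvBStep (acc : List String × List Char) (ch : Char) : List String × List Char :=
  let buf := acc.2 ++ [ch]
  if ch = '.' ∨ ch = '?' ∨ ch = '!' then
    let clause := PySem.Chars.strip buf
    ((if clause ≠ [] then acc.1 ++ [String.ofList clause] else acc.1), [])
  else (acc.1, buf)

def pop_ready_clauses_py_alt (text : String) : List String × String :=
  let r := text.toList.foldl pvBStep ([], [])
  (r.1, String.ofList r.2)

-- ===== PRECONDITION & SPEC =====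
def Spec_pop_ready_clauses_py (text : String) (out : List String × String) : Prop := out = pop_ready_clauses_py_alt text
instance (text : String) (out : List String × String) : Decidable (Spec_pop_ready_clauses_py text out) := by unfold Spec_pop_ready_clauses_py; infer_instance

-- ===== CLAIM (what is proved, stated in full; the proofs are below) =====
def Claim_equal_pop_ready_clauses_py : Prop := ∀ (text : String), Dom_pop_ready_clauses_py text → Spec_pop_ready_clauses_py text (pop_ready_clauses_py text)

-- ===== LEMMAS AND PROOFS =====

-- buffer grows by the next character of cs
lemma buf_push (cs : List Char) (start j : Nat) (ch : Char) (rest : List Char)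
    (hle : start ≤ j) (hdrop : cs.drop j = ch :: rest) :
    (cs.drop start).take (j - start) ++ [ch] = (cs.drop start).take (j + 1 - start) := by
  have h1 : (cs.drop start).drop (j - start) = ch :: rest := by
    rw [List.drop_drop]
    have he : start + (j - start) = j := by omega
    rw [he]; exact hdrop
  have h2 : (cs.drop start)[j - start]? = some ch := by
    rw [← List.head?_drop, h1]; rfl
  have : j + 1 - start = (j - start) + 1 := by omega
  rw [this, List.take_add_one, h2]; rfl

-- main loop invariant: A's enumerate-fold with slice-from-start equals B's buffer fold
lemma loop_eq (cs : List Char) : ∀ (rest : List Char) (j start : Nat) (acc : List String),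
    start ≤ j → rest = cs.drop j →
    ((((PySem.List.enumerate rest (j : Int)).foldl (pvAStep cs) (acc, (start : Int))).1,
      PySem.List.slice cs (some (((PySem.List.enumerate rest (j : Int)).foldl (pvAStep cs) (acc, (start : Int))).2)) none)
      : List String × List Char)
    = ((rest.foldl pvBStep (acc, (cs.drop start).take (j - start))).1,
       (rest.foldl pvBStep (acc, (cs.drop start).take (j - start))).2) := by
  intro rest
  induction rest with
  | nil =>
    intro j start acc hle hdrop
    simp only [PySem.List.enumerate_nil, List.foldl_nil]
    rw [PySem.List.slice_from cs (Int.natCast_nonneg start)]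
    simp only [Int.toNat_natCast]
    have hlen : cs.length ≤ j := by
      have := congrArg List.length hdrop
      simp at this; omega
    rw [List.take_of_length_le (by simp; omega)]
  | cons ch rest ih =>
    intro j start acc hle hdrop
    have hj : j < cs.length := by
      by_contra h
      rw [List.drop_of_length_le (by omega)] at hdrop
      simp at hdrop
    have hrest : rest = cs.drop (j + 1) := by
      have := congrArg (List.drop 1) hdrop
      simpa [List.drop_drop, Nat.add_comm] using this
    rw [PySem.List.enumerate_cons, List.foldl_cons, List.foldl_cons]
    by_cases hterm : ch = '.' ∨ ch = '?' ∨ ch = '!'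
    · -- terminator: both flush the same clause
      have hslice : PySem.List.slice cs (some (start : Int)) (some ((j : Int) + 1))
          = (cs.drop start).take (j + 1 - start) := by
        have : ((j : Int) + 1) = ((j + 1 : Nat) : Int) := by push_cast; ring
        rw [this, PySem.List.slice_toNat cs (Int.natCast_nonneg start) (Int.natCast_nonneg (j+1))]
        simp [Int.toNat_natCast]
      have hbuf := buf_push cs start j ch rest hle hdrop.symm
      simp only [pvAStep, pvBStep, hterm, if_true, hslice, hbuf]
      have hint : (j : Int) + 1 = ((j + 1 : Nat) : Int) := by push_cast; ring
      rw [hint]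
      have := ih (j + 1) (j + 1)
        (if PySem.Chars.strip ((cs.drop start).take (j + 1 - start)) ≠ [] then
           acc ++ [String.ofList (PySem.Chars.strip ((cs.drop start).take (j + 1 - start)))] else acc)
        (le_refl _) hrest
      simpa using this
    · -- ordinary character: A's state unchanged, B extends the buffer
      have hbuf := buf_push cs start j ch rest hle hdrop.symm
      simp only [pvAStep, pvBStep, hterm, if_false]
      have := ih (j + 1) start acc (by omega) hrest
      simp only [hbuf] at *
      exact this

-- ===== VERDICT (by name: the statement is the Claim_ definition above) =====
theorem pop_ready_clauses_py_spec : Claim_equal_pop_ready_clauses_py := by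
  intro text _
  unfold Spec_pop_ready_clauses_py pop_ready_clauses_py pop_ready_clauses_py_alt
  have h := loop_eq text.toList text.toList 0 0 [] (le_refl 0) rfl
  simp only [List.drop_zero, Nat.sub_self, List.take_zero, Nat.cast_zero] at h
  rw [Prod.ext_iff] at h ⊢
  exact ⟨h.1, congrArg String.ofList h.2⟩
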